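-- pv_equiv track=rewrite | github.com/BeibarysSaparbay/Ninja | TSIS2/1.py | func
-- ===== SOURCE A (Python) =====
-- def func(adress):
--     c = ""
--     for i in adress:
--         if i == ".":
--             c +="[.]"
--         else:
--             c += i
--     return c
-- ===== SOURCE B (Python) =====
-- def func(adress):
--     return "[.]".join(adress.split("."))
-- ===== Notes on version B (the rewrite author's own statement) =====
-- stated objective: idiomatic
-- what changed: Replaces the per-character accumulation loop with a split on the dot character into segments followed by a single join over them.
import Mathlib
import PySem

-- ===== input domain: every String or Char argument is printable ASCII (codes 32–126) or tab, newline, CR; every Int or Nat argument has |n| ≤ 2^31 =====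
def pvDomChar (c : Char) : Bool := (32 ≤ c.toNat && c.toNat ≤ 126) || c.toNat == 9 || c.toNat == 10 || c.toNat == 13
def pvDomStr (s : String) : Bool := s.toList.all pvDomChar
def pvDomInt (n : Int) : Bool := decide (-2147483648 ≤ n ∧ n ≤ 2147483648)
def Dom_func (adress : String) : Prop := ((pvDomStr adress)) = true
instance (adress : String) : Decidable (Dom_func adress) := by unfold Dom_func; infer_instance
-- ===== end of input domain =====

-- B replaces A's per-character accumulation loop by split-on-'.' followed by "[.]".join (idiomatic).

-- ===== PORT A =====
-- Python string concatenation is modelled exactly on the char lists (String.ofList of the folded chars).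
def func (adress : String) : String :=
  String.ofList
    (adress.toList.foldl
      (fun c i => if i == '.' then c ++ "[.]".toList else c ++ [i]) [])

-- ===== PORT B =====
-- adress.split(".") → PySem.Chars.splitOn (the sep ≠ "" form); "[.]".join(...) → PySem.Str.join.
def func_alt (adress : String) : String :=
  PySem.Str.join "[.]" ((PySem.Chars.splitOn adress.toList ".".toList).map String.ofList)

-- ===== PRECONDITION & SPEC =====
def Spec_func (adress : String) (out : String) : Prop := out = func_alt adress
instance (adress : String) (out : String) : Decidable (Spec_func adress out) := by unfold Spec_func; infer_instance

-- ===== CLAIM (what is proved, stated in full; the proofs are below) =====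
def Claim_equal_func : Prop := ∀ (adress : String), Dom_func adress → Spec_func adress (func adress)

-- ===== LEMMAS AND PROOFS =====

-- the per-character substitution
def pvSub (i : Char) : List Char := if i == '.' then "[.]".toList else [i]

-- simple structural splitter: the segments of l between dots (always nonempty)
def pvSp : List Char → List (List Char)
  | [] => [[]]
  | c :: rest =>
    if c = '.' then [] :: pvSp rest
    else match pvSp rest with
      | [] => [[c]]
      | h :: t => (c :: h) :: t

-- prepend x to the first segment
def pvConsH (x : List Char) : List (List Char) → List (List Char)
  | [] => [x]
  | h :: t => (x ++ h) :: t

lemma pvSp_ne_nil (l : List Char) : pvSp l ≠ [] := by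
  cases l with
  | nil => simp [pvSp]
  | cons c rest =>
    simp only [pvSp]
    split
    · simp
    · split <;> simp

lemma go_acc (sep : List Char) (fuel : Nat) :
    ∀ (l cur acc : List Char) (accs : List (List Char)),
      PySem.Chars.splitOn.go sep fuel l cur (acc :: accs)
        = (acc :: accs).reverse ++ PySem.Chars.splitOn.go sep fuel l cur [] := by
  induction fuel with
  | zero =>
    intro l cur acc accs
    simp [PySem.Chars.splitOn.go]
  | succ fuel ih =>
    intro l cur acc accs
    cases l with
    | nil => simp [PySem.Chars.splitOn.go]
    | cons c rest =>
      rw [PySem.Chars.splitOn.go, PySem.Chars.splitOn.go]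
      split
      · rw [ih, ih _ _ (cur.reverse) []]
        simp
      · exact ih _ _ _ _

lemma go_spec (fuel : Nat) :
    ∀ (l cur : List Char), l.length < fuel →
      PySem.Chars.splitOn.go ['.'] fuel l cur [] = pvConsH cur.reverse (pvSp l) := by
  induction fuel with
  | zero => intro l cur h; omega
  | succ fuel ih =>
    intro l cur h
    cases l with
    | nil => simp [PySem.Chars.splitOn.go, pvSp, pvConsH]
    | cons c rest =>
      rw [PySem.Chars.splitOn.go]
      by_cases hc : c = '.'
      · subst hc
        have hpre : List.isPrefixOf ['.'] ('.' :: rest) = true := by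
          simp [List.isPrefixOf]
        rw [if_pos hpre]
        rw [go_acc]
        simp only [show List.drop ['.'].length ('.' :: rest) = rest from rfl]
        rw [ih rest [] (by simpa using Nat.lt_of_succ_lt_succ h)]
        cases hsp : pvSp rest with
        | nil => exact absurd hsp (pvSp_ne_nil rest)
        | cons a b => simp [pvSp, pvConsH, hsp]
      · have hpre : List.isPrefixOf ['.'] (c :: rest) = false := by
          simp [List.isPrefixOf]
          exact fun hch => absurd hch.symm hc
        rw [if_neg (by simp [hpre])]
        rw [ih rest (c :: cur) (by simpa using Nat.lt_of_succ_lt_succ h)]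
        cases hsp : pvSp rest with
        | nil => exact absurd hsp (pvSp_ne_nil rest)
        | cons a b => simp [pvSp, pvConsH, hsp, hc]

lemma splitOn_eq_pvSp (l : List Char) :
    PySem.Chars.splitOn l ['.'] = pvSp l := by
  rw [PySem.Chars.splitOn, go_spec (l.length + 1) l [] (by omega)]
  cases hsp : pvSp l with
  | nil => exact absurd hsp (pvSp_ne_nil l)
  | cons a b => simp [pvConsH]

lemma join_pvSp (l : List Char) :
    PySem.Chars.join "[.]".toList (pvSp l) = l.flatMap pvSub := by
  induction l with
  | nil => simp [pvSp, PySem.Chars.join_singleton]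
  | cons c rest ih =>
    by_cases hc : c = '.'
    · subst hc
      have h1 : pvSp ('.' :: rest) = [] :: pvSp rest := by simp [pvSp]
      rw [h1]
      cases hsp : pvSp rest with
      | nil => exact absurd hsp (pvSp_ne_nil rest)
      | cons a b =>
        rw [PySem.Chars.join_cons_cons]
        rw [← hsp, ih]
        simp [pvSub]
    · cases hsp : pvSp rest with
      | nil => exact absurd hsp (pvSp_ne_nil rest)
      | cons a b =>
        have h1 : pvSp (c :: rest) = (c :: a) :: b := by simp [pvSp, hc, hsp]
        rw [h1]
        have h2 : PySem.Chars.join "[.]".toList ((c :: a) :: b)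
            = c :: PySem.Chars.join "[.]".toList (a :: b) := by
          cases b with
          | nil => simp [PySem.Chars.join_singleton]
          | cons q t => rw [PySem.Chars.join_cons_cons, PySem.Chars.join_cons_cons]; simp
        rw [h2, ← hsp, ih]
        simp [pvSub, hc]

lemma foldl_eq_flatMap' (l : List Char) :
    ∀ (acc : List Char),
      l.foldl (fun c i => if i == '.' then c ++ "[.]".toList else c ++ [i]) acc
        = acc ++ l.flatMap pvSub := by
  induction l with
  | nil => intro acc; simp
  | cons c rest ih =>
    intro acc
    by_cases hc : c = '.'
    · subst hc
      simp only [List.foldl_cons]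
      rw [ih]
      simp [pvSub]
    · simp only [List.foldl_cons]
      rw [ih]
      simp [pvSub, hc]

lemma foldl_eq_flatMap (l : List Char) :
    l.foldl (fun c i => if i == '.' then c ++ "[.]".toList else c ++ [i]) []
      = l.flatMap pvSub := by
  simpa using foldl_eq_flatMap' l []

-- ===== VERDICT (by name: the statement is the Claim_ definition above) =====
theorem func_spec : Claim_equal_func := by
  intro adress _
  unfold Spec_func func func_alt
  rw [PySem.Str.join]
  apply congrArg String.ofList
  rw [foldl_eq_flatMap]
  have hmap : List.map String.toList
      (List.map String.ofList (PySem.Chars.splitOn adress.toList ".".toList))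
        = PySem.Chars.splitOn adress.toList ".".toList := by
    simp [List.map_map, Function.comp_def]
  rw [hmap]
  have hsep : (".".toList : List Char) = ['.'] := by decide
  rw [hsep, splitOn_eq_pvSp, join_pvSp]
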